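-- pv_equiv track=rewrite | github.com/kaori-killer/BAEKJOON-SUMMER-CHALLENGE | CHAPTER_03_그리디/큰 수의 법칙.py | solution
-- ===== SOURCE A (Python) =====
-- def solution(n, m, k, li):  # n: 배열의 크기, m: 숫자가 더해지는 횟수, k: 연속 가능 횟수
--     li.sort(reverse=True)
--     count = 0
--     answer = 0
--
--     while count != m:
--         for _ in range(k):
--             answer += li[0]
--             count += 1
--
--             if count == m:
--                 return answer
--
--         answer += li[1]
--         count += 1
--     return answer
-- ===== SOURCE B (Python) =====
-- def solution(n, m, k, li):  # closed form instead of simulating the m additions one by one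
--     li.sort(reverse=True)
--     full = (m // (k + 1)) * k + m % (k + 1)
--     return full * li[0] + (m - full) * li[1]
-- ===== Notes on version B (the rewrite author's own statement) =====
-- stated objective: simpler
-- what changed: Replaces A's step-by-step simulation loop (m iterations of adding li[0]/li[1] with an early-return counter) with a direct closed form: full = (m//(k+1))*k + m%(k+1) occurrences of the largest element, the remaining m-full of the second largest.
-- outside the precondition, e.g. on solution(1, 1, 2, [5]): A returns 5, B raises IndexError; on solution(2, 3, -2, [5, 1]): A returns 3, B returns 27
import Mathlib
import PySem

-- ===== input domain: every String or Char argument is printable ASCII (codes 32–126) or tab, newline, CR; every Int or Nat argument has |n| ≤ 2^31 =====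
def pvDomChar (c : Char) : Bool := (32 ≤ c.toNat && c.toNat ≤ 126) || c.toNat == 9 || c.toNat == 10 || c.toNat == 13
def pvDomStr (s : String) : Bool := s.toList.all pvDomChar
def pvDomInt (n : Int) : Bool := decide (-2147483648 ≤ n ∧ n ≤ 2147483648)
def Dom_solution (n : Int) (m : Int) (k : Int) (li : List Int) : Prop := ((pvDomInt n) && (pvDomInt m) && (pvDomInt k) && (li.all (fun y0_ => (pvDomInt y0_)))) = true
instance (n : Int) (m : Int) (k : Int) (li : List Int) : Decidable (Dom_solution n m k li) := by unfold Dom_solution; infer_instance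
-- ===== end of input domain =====

-- B replaces A's step-by-step simulation loop by the closed-form count of how often each of
-- the two largest values is added. Both A and B sort `li` in place (same side effect); the
-- theorems below are about the return value.

-- ===== PORT A =====
-- inner `for _ in range(k)` loop: .inl = early `return answer`, .inr = loop finished
def innerA (m li0 : Int) : Nat → Int → Int → Sum Int (Int × Int)
  | 0, answer, count => .inr (answer, count)
  | j+1, answer, count =>
      let answer := answer + li0
      let count := count + 1
      if count = m then .inl answer
      else innerA m li0 j answer count

-- outer `while count != m` loop; fuel only makes the recursion structural (never exhausted
-- when Pre_solution holds, since count strictly increases toward m)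
def outerA (m k li0 li1 : Int) : Nat → Int → Int → Int
  | 0, answer, _ => answer
  | fuel+1, answer, count =>
      if count = m then answer
      else
        match innerA m li0 k.toNat answer count with
        | .inl ans => ans
        | .inr (ans, cnt) => outerA m k li0 li1 fuel (ans + li1) (cnt + 1)

def solution (n : Int) (m : Int) (k : Int) (li : List Int) : Int :=
  let ls := PySem.List.sorted li (fun x => x) true
  match PySem.List.pyGet? ls 0, PySem.List.pyGet? ls 1 with
  | some li0, some li1 => outerA m k li0 li1 (m.toNat + 1) 0 0
  | _, _ => 0  -- IndexError in Python; outside Pre_solution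

-- ===== PORT B =====
def solution_alt (n : Int) (m : Int) (k : Int) (li : List Int) : Int :=
  let ls := PySem.List.sorted li (fun x => x) true
  let full := PySem.Int.floordiv m (k + 1) * k + PySem.Int.mod m (k + 1)
  ((PySem.List.pyGet? ls 0).bind fun a =>
    (PySem.List.pyGet? ls 1).map fun b =>
      full * a + (m - full) * b).getD 0  -- none = IndexError in Python; outside Pre_solution

-- ===== PRECONDITION & SPEC =====
-- Pre_ restricts to the problem's natural domain (m additions, k ≥ 0 consecutive, n ≥ 2 numbers):
-- for m < 0 A diverges; for k < 0 or lists shorter than 2 B's closed form raises or differs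
-- (A there relies on degenerate loop behaviour outside the task's domain).
def Pre_solution (n : Int) (m : Int) (k : Int) (li : List Int) : Prop :=
  0 ≤ m ∧ 0 ≤ k ∧ 2 ≤ li.length
instance (n : Int) (m : Int) (k : Int) (li : List Int) : Decidable (Pre_solution n m k li) := by unfold Pre_solution; infer_instance

def pvWitness_solution : Int × Int × Int × List Int := (2, 5, 2, [3, 1])

def Spec_solution (n : Int) (m : Int) (k : Int) (li : List Int) (out : Int) : Prop := out = solution_alt n m k li
instance (n : Int) (m : Int) (k : Int) (li : List Int) (out : Int) : Decidable (Spec_solution n m k li out) := by unfold Spec_solution; infer_instance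

-- ===== CLAIM (what is proved, stated in full; the proofs are below) =====
def Claim_equal_solution : Prop := ∀ (n : Int) (m : Int) (k : Int) (li : List Int), Dom_solution n m k li → Pre_solution n m k li → Spec_solution n m k li (solution n m k li)

-- ===== LEMMAS AND PROOFS =====

-- closed form of the remaining sum when r more additions are due
def cf (k r li0 li1 : Int) : Int :=
  let full := PySem.Int.floordiv r (k + 1) * k + PySem.Int.mod r (k + 1)
  full * li0 + (r - full) * li1

-- inner loop, no early return: count passes strictly below m
theorem innerA_no_return (m li0 : Int) (j : Nat) :
    ∀ (ans cnt : Int), cnt + (j : Int) < m →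
      innerA m li0 j ans cnt = .inr (ans + (j : Int) * li0, cnt + (j : Int)) := by
  induction j with
  | zero => intro ans cnt _; simp [innerA]
  | succ j ih =>
      intro ans cnt h
      have hne : ¬ (cnt + 1 = m) := by push_cast at h ⊢; omega
      rw [innerA, if_neg hne, ih (ans + li0) (cnt + 1) (by push_cast at h ⊢; omega)]
      push_cast
      simp only [Sum.inr.injEq, Prod.mk.injEq]
      exact ⟨by ring, by ring⟩

-- inner loop, early return at count = m
theorem innerA_return (m li0 : Int) (j : Nat) :
    ∀ (ans cnt : Int), cnt < m → m ≤ cnt + (j : Int) →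
      innerA m li0 j ans cnt = .inl (ans + (m - cnt) * li0) := by
  induction j with
  | zero => intro ans cnt h1 h2; push_cast at h2; omega
  | succ j ih =>
      intro ans cnt h1 h2
      by_cases he : cnt + 1 = m
      · rw [innerA, if_pos he]
        have : m - cnt = 1 := by omega
        rw [this]; ring_nf
      · rw [innerA, if_neg he,
          ih (ans + li0) (cnt + 1) (by omega) (by push_cast at h2 ⊢; omega)]
        congr 1; ring

theorem outerA_cf (m k li0 li1 : Int) (hk : 0 ≤ k) (fuel : Nat) :
    ∀ (ans cnt : Int), 0 ≤ cnt → cnt ≤ m → (m - cnt).toNat ≤ fuel →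
      outerA m k li0 li1 fuel ans cnt = ans + cf k (m - cnt) li0 li1 := by
  have hpos : 0 < k + 1 := by omega
  induction fuel with
  | zero =>
      intro ans cnt _ h1 h2
      have : cnt = m := by omega
      subst this
      simp [outerA, cf, PySem.Int.floordiv_eq_ediv_of_pos hpos,
        PySem.Int.mod_eq_emod_of_pos hpos]
  | succ fuel ih =>
      intro ans cnt h0 h1 h2
      by_cases he : cnt = m
      · subst he
        simp [outerA, cf, PySem.Int.floordiv_eq_ediv_of_pos hpos,
          PySem.Int.mod_eq_emod_of_pos hpos]
      · have hlt : cnt < m := lt_of_le_of_ne h1 he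
        have hkcast : ((k.toNat : Int)) = k := Int.toNat_of_nonneg hk
        rw [outerA, if_neg he]
        by_cases hcase : m ≤ cnt + k
        · -- early return inside the for loop
          rw [innerA_return m li0 k.toNat ans cnt hlt (by rw [hkcast]; exact hcase)]
          have hq : PySem.Int.floordiv (m - cnt) (k + 1) = 0 := by
            rw [PySem.Int.floordiv_eq_ediv_of_pos hpos]
            exact Int.ediv_eq_zero_of_lt (by omega) (by omega)
          have hm : PySem.Int.mod (m - cnt) (k + 1) = m - cnt := by
            rw [PySem.Int.mod_eq_emod_of_pos hpos]
            exact Int.emod_eq_of_lt (by omega) (by omega)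
          simp [cf, hq, hm]
        · -- full block of k top additions, then one second addition, recurse
          rw [innerA_no_return m li0 k.toNat ans cnt (by rw [hkcast]; omega), hkcast]
          show outerA m k li0 li1 fuel (ans + k * li0 + li1) (cnt + k + 1) = _
          rw [ih (ans + k * li0 + li1) (cnt + k + 1) (by omega) (by omega) (by omega)]
          have hsplit : m - cnt = (m - (cnt + k + 1)) + 1 * (k + 1) := by ring
          set r' := m - (cnt + k + 1) with hr'
          have hq : (m - cnt) / (k + 1) = r' / (k + 1) + 1 := by
            rw [hsplit, Int.add_mul_ediv_right _ _ (by omega : k + 1 ≠ 0)]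
          have hm : (m - cnt) % (k + 1) = r' % (k + 1) := by
            rw [hsplit, Int.add_mul_emod_self_right]
          simp only [cf, PySem.Int.floordiv_eq_ediv_of_pos hpos,
            PySem.Int.mod_eq_emod_of_pos hpos, hq, hm]
          ring

-- ===== VERDICT (by name: the statement is the Claim_ definition above) =====
theorem solution_spec : Claim_equal_solution := by
  intro n m k li _ hpre
  obtain ⟨hm, hk, hlen⟩ := hpre
  unfold Spec_solution solution solution_alt
  have hlen' : 2 ≤ (PySem.List.sorted li (fun x => x) true).length := by
    rwa [PySem.List.length_sorted]
  cases hls : PySem.List.sorted li (fun x => x) true with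
  | nil => simp [hls] at hlen'
  | cons a t =>
      cases t with
      | nil => simp [hls] at hlen'
      | cons b t' =>
          have h0 : PySem.List.pyGet? (a :: b :: t') (0 : Int) = some a :=
            PySem.List.pyGet?_zero_cons a (b :: t')
          have h1 : PySem.List.pyGet? (a :: b :: t') (1 : Int) = some b := by
            have := PySem.List.pyGet?_cons_succ (x := a) (xs := b :: t') (n := 0)
            simpa [PySem.List.pyGet?_zero_cons] using this
          simp only [h0, h1]
          rw [outerA_cf m k a b hk (m.toNat + 1) 0 0 le_rfl hm (by omega)]
          simp [cf]
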